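-- pv_equiv track=rewrite | github.com/CDCgov/phdi | containers/record-linkage/app/linkage/seed.py | extract_given_name
-- ===== SOURCE A (Python) =====
-- from typing import Dict
--
-- def extract_given_name(data: Dict):
--     first_name = data.get("first_name", None)
--     middle_name = data.get("middle_name", None)
--
--     given_names = []
--
--     for name in [first_name, middle_name]:
--         if name is not None:
--             for n in name.split():
--                 given_names.append(n)
--
--     if len(given_names) > 0:
--         return given_names
--     else:
--         return None
-- ===== SOURCE B (Python) =====
-- def extract_given_name(data):
--     # Hand-rolled one-pass character scanner: no str.split at all.
--     text = (data.get("first_name") or "") + " " + (data.get("middle_name") or "")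
--     tokens = []
--     cur = ""
--     for ch in text:
--         if ch.isspace():
--             if cur:
--                 tokens.append(cur)
--                 cur = ""
--         else:
--             cur += ch
--     if cur:
--         tokens.append(cur)
--     return tokens if tokens else None
-- ===== Notes on version B (the rewrite author's own statement) =====
-- stated objective: alternative
-- what changed: Replaced the two dict-value split()-and-append loops with a single hand-written character-level scanner: the present names are concatenated once and a one-pass state machine (current-word buffer + token list) tokenizes the combined text, never calling str.split.
import Mathlib
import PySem

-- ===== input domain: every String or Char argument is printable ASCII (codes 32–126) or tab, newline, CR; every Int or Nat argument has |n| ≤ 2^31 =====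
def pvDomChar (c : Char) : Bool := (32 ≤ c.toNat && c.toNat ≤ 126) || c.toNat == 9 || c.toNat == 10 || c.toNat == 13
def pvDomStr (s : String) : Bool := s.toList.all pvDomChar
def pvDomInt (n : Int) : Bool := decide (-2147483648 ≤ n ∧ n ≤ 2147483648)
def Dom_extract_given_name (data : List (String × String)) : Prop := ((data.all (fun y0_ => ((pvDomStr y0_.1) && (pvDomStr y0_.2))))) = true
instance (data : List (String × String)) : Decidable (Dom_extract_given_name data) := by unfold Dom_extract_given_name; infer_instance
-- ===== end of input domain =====

-- B replaces the split()-based loops with a single hand-written one-pass character scanner (alternative decomposition, same cost).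

-- ===== PORT A =====
def extract_given_name (data : List (String × String)) : Option (List String) :=
  let first_name : Option String := (PySem.Dict.mk data).get? "first_name"
  let middle_name : Option String := (PySem.Dict.mk data).get? "middle_name"
  let given_names : List String :=
    [first_name, middle_name].foldl (fun gs name =>
      match name with
      | none => gs
      | some nm => (PySem.Str.split₀ nm).foldl (fun gs n => gs ++ [n]) gs) []
  if given_names.length > 0 then some given_names else none

-- ===== PORT B =====
def extract_given_name_alt (data : List (String × String)) : Option (List String) :=
  -- text = (data.get("first_name") or "") + " " + (data.get("middle_name") or "")
  -- (a dict value here is a string, and `s or ""` is `s`, so `x or ""` is exactly `getD "");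
  -- per PySem convention string building is done over List Char: `cur` (a str in Source B) is the
  -- current word as a char list, `cur += ch` is `cur ++ [ch]`, and each finished token is the
  -- string of its chars
  let f : String := ((PySem.Dict.mk data).get? "first_name").getD ""
  let m : String := ((PySem.Dict.mk data).get? "middle_name").getD ""
  let text : List Char := f.toList ++ ' ' :: m.toList
  let st : List (List Char) × List Char :=
    text.foldl (fun st ch =>
      if PySem.Chars.isspace ch then
        if st.2 ≠ [] then (st.1 ++ [st.2], []) else st
      else (st.1, st.2 ++ [ch])) ([], [])
  let toks : List (List Char) := if st.2 ≠ [] then st.1 ++ [st.2] else st.1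
  let tokens : List String := toks.map String.ofList
  if tokens.isEmpty then none else some tokens

-- ===== PRECONDITION & SPEC =====
def Spec_extract_given_name (data : List (String × String)) (out : Option (List String)) : Prop := out = extract_given_name_alt data
instance (data : List (String × String)) (out : Option (List String)) : Decidable (Spec_extract_given_name data out) := by unfold Spec_extract_given_name; infer_instance

-- ===== CLAIM (what is proved, stated in full; the proofs are below) =====
def Claim_equal_extract_given_name : Prop := ∀ (data : List (String × String)), Dom_extract_given_name data → Spec_extract_given_name data (extract_given_name data)

-- ===== LEMMAS AND PROOFS =====

theorem foldl_snoc (l : List String) (init : List String) :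
    l.foldl (fun gs n => gs ++ [n]) init = init ++ l := by
  induction l generalizing init with
  | nil => simp
  | cons x xs ih => simp [List.foldl, ih]

theorem split₀_go_acc (s cur : List Char) (acc : List (List Char)) :
    PySem.Chars.split₀.go s cur acc = acc.reverse ++ PySem.Chars.split₀.go s cur [] := by
  induction s generalizing cur acc with
  | nil =>
    by_cases h : cur.isEmpty <;> simp [PySem.Chars.split₀.go, h]
  | cons c rest ih =>
    by_cases hs : PySem.Chars.isspace c
    · by_cases h : cur.isEmpty
      · simp only [PySem.Chars.split₀.go, hs, h, if_true]
        exact ih [] acc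
      · simp only [PySem.Chars.split₀.go, hs, h, if_true]
        rw [ih [] (cur.reverse :: acc), ih [] [cur.reverse]]
        simp
    · simp only [PySem.Chars.split₀.go, hs]
      exact ih (c :: cur) acc

theorem split₀_go_space (a b : List Char) (cur : List Char) :
    PySem.Chars.split₀.go (a ++ ' ' :: b) cur [] =
      PySem.Chars.split₀.go a cur [] ++ PySem.Chars.split₀.go b [] [] := by
  induction a generalizing cur with
  | nil =>
    by_cases h : cur.isEmpty
    · simp [PySem.Chars.split₀.go, h, PySem.Chars.isspace]
    · simp only [List.nil_append, PySem.Chars.split₀.go, h]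
      rw [split₀_go_acc b [] [cur.reverse]]
      simp [PySem.Chars.isspace]
  | cons c a ih =>
    by_cases hs : PySem.Chars.isspace c
    · by_cases h : cur.isEmpty
      · simp only [List.cons_append, PySem.Chars.split₀.go, hs, h, if_true]
        exact ih []
      · simp only [List.cons_append, PySem.Chars.split₀.go, hs, h, if_true]
        rw [split₀_go_acc (a ++ ' ' :: b) [] [cur.reverse], split₀_go_acc a [] [cur.reverse]]
        simp [ih]
    · simp only [List.cons_append, PySem.Chars.split₀.go, hs]
      exact ih (c :: cur)

-- the B scanner loop, run from token list `toks` and current word `c` (kept forward;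
-- split₀.go keeps it reversed), computes `toks` followed by split₀'s words
theorem scan_eq_split₀_go (l : List Char) (toks : List (List Char)) (c : List Char) :
    (let st := l.foldl (fun st ch =>
        if PySem.Chars.isspace ch then
          if st.2 ≠ [] then (st.1 ++ [st.2], []) else st
        else (st.1, st.2 ++ [ch])) (toks, c)
     if st.2 ≠ [] then st.1 ++ [st.2] else st.1) =
      toks ++ PySem.Chars.split₀.go l c.reverse [] := by
  induction l generalizing toks c with
  | nil =>
    by_cases h : c = []
    · simp [PySem.Chars.split₀.go, h]
    · simp [PySem.Chars.split₀.go, h]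
  | cons ch rest ih =>
    by_cases hs : PySem.Chars.isspace ch
    · by_cases h : c = []
      · simpa [h, PySem.Chars.split₀.go, hs] using ih toks []
      · simp only [List.foldl_cons, hs, if_true, h, ne_eq, ite_not]
        simp only [if_false]
        have := ih (toks ++ [c]) []
        simp only [List.reverse_nil] at this
        simp only [ite_not] at this
        rw [this]
        have h1 : c.reverse.isEmpty = false := by simp [h]
        simp only [PySem.Chars.split₀.go, hs, h1, if_true, if_false, Bool.false_eq_true]
        rw [split₀_go_acc rest [] [c.reverse.reverse]]
        simp
    · simp only [List.foldl_cons, hs, if_false, Bool.false_eq_true]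
      have := ih toks (c ++ [ch])
      rw [this]
      simp [PySem.Chars.split₀.go, hs]

theorem if_len_empty (l : List String) :
    (if l.length > 0 then some l else none) = (if l.isEmpty then none else some l) := by
  cases l <;> simp

theorem str_split₀_toList (s : String) :
    PySem.Str.split₀ s = (PySem.Chars.split₀ s.toList).map String.ofList := by
  simp [PySem.Str.split₀]

-- ===== VERDICT (by name: the statement is the Claim_ definition above) =====
theorem extract_given_name_spec : Claim_equal_extract_given_name := by
  intro data _
  unfold Spec_extract_given_name extract_given_name extract_given_name_alt
  cases hf : (PySem.Dict.mk data).get? "first_name" with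
  | none =>
    cases hm : (PySem.Dict.mk data).get? "middle_name" with
    | none =>
      simp only [List.foldl, Option.getD]
      rw [scan_eq_split₀_go _ [] []]
      simp [PySem.Chars.split₀.go, PySem.Chars.isspace]
    | some m =>
      simp only [List.foldl, Option.getD]
      rw [scan_eq_split₀_go _ [] [], foldl_snoc]
      simp only [List.reverse_nil, List.nil_append]
      have h0 : ("" : String).toList ++ ' ' :: m.toList = [] ++ ' ' :: m.toList := rfl
      rw [h0, split₀_go_space [] m.toList [], str_split₀_toList, if_len_empty]
      simp [PySem.Chars.split₀.go, PySem.Chars.split₀]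
  | some f =>
    cases hm : (PySem.Dict.mk data).get? "middle_name" with
    | none =>
      simp only [List.foldl, Option.getD]
      rw [scan_eq_split₀_go _ [] [], foldl_snoc]
      simp only [List.reverse_nil, List.nil_append]
      have h0 : f.toList ++ ' ' :: ("" : String).toList = f.toList ++ ' ' :: [] := rfl
      rw [h0, split₀_go_space f.toList [] [], str_split₀_toList, if_len_empty]
      simp [PySem.Chars.split₀.go, PySem.Chars.split₀]
    | some m =>
      simp only [List.foldl, Option.getD]
      rw [scan_eq_split₀_go _ [] [], foldl_snoc, foldl_snoc]
      simp only [List.reverse_nil, List.nil_append]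
      rw [split₀_go_space f.toList m.toList [], str_split₀_toList, str_split₀_toList,
        if_len_empty]
      simp [PySem.Chars.split₀]
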